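-- pv_equiv track=rewrite | github.com/liammcnamaraa/Cook_Lab | main/SheavescodeDmitrii.py | get_boundary_simplices
-- ===== SOURCE A (Python) =====
-- from itertools import combinations
--
-- def get_boundary_simplices(simplex_tuple, codim=1):
--     """Returns (codim)-boundary simplices."""
--     if not simplex_tuple or len(simplex_tuple) <= codim:
--         return []
--     target_len = len(simplex_tuple) - codim
--     boundary = []
--     for face_tuple_gen in combinations(simplex_tuple, target_len):
--         boundary.append(tuple(sorted(face_tuple_gen)))
--     return boundary
-- ===== SOURCE B (Python) =====
-- def get_boundary_simplices(simplex_tuple, codim=1):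
--     """Returns (codim)-boundary simplices."""
--     if not simplex_tuple or len(simplex_tuple) <= codim:
--         return []
--     target_len = len(simplex_tuple) - codim
--     out = []
--
--     def rec(i, chosen):
--         if len(chosen) == target_len:
--             out.append(tuple(sorted(chosen)))
--         elif i < len(simplex_tuple):
--             rec(i + 1, chosen + [simplex_tuple[i]])  # include element i
--             rec(i + 1, chosen)                       # skip element i
--
--     rec(0, [])
--     return out
-- ===== Notes on version B (the rewrite author's own statement) =====
-- stated objective: alternative
-- what changed: Replaces the itertools.combinations loop with a recursive include/exclude enumerator over positions that emits each sorted face at the base case, in the same lexicographic-by-position order.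
import Mathlib
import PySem

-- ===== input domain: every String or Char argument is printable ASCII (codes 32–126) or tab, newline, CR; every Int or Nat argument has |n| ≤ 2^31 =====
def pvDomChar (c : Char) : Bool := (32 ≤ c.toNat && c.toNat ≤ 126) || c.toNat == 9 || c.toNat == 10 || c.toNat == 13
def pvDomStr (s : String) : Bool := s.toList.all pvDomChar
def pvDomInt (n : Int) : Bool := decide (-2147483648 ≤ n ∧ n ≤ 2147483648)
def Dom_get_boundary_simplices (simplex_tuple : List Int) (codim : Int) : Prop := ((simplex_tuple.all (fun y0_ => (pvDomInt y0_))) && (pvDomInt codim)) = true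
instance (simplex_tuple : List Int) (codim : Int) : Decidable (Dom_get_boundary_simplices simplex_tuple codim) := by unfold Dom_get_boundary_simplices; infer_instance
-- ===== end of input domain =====

-- B replaces the itertools.combinations loop by a recursive include/exclude enumerator
-- over positions (same order, same sorted faces): an alternative decomposition, not faster.


-- ===== PORT A =====
-- itertools.combinations(xs, k): length-k subsequences in lexicographic-by-position order
def pvCombos : List Int → Nat → List (List Int)
  | _, 0 => [[]]
  | [], _ + 1 => []
  | x :: rest, k + 1 => (pvCombos rest k).map (fun c => x :: c) ++ pvCombos rest (k + 1)

def get_boundary_simplices (simplex_tuple : List Int) (codim : Int) : List (List Int) :=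
  if simplex_tuple = [] ∨ (simplex_tuple.length : Int) ≤ codim then []
  else
    let target_len := ((simplex_tuple.length : Int) - codim).toNat
    (pvCombos simplex_tuple target_len).foldl
      (fun boundary face => boundary ++ [PySem.List.sorted face (fun v => v)]) []

-- ===== PORT B =====
-- rec(i, chosen): include element i, then skip it; emit sorted chosen when full.
-- (the index i of Source B is represented by the remaining suffix of the list)
def pvRecB (target : Nat) : List Int → List Int → List (List Int)
  | chosen, [] =>
    if chosen.length = target then [PySem.List.sorted chosen (fun v => v)] else []
  | chosen, x :: rest' =>
    if chosen.length = target then [PySem.List.sorted chosen (fun v => v)]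
    else pvRecB target (chosen ++ [x]) rest' ++ pvRecB target chosen rest'

def get_boundary_simplices_alt (simplex_tuple : List Int) (codim : Int) : List (List Int) :=
  if simplex_tuple = [] ∨ (simplex_tuple.length : Int) ≤ codim then []
  else
    let target_len := ((simplex_tuple.length : Int) - codim).toNat
    pvRecB target_len [] simplex_tuple

-- ===== PRECONDITION & SPEC =====
def Spec_get_boundary_simplices (simplex_tuple : List Int) (codim : Int) (out : List (List Int)) : Prop := out = get_boundary_simplices_alt simplex_tuple codim
instance (simplex_tuple : List Int) (codim : Int) (out : List (List Int)) : Decidable (Spec_get_boundary_simplices simplex_tuple codim out) := by unfold Spec_get_boundary_simplices; infer_instance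

-- ===== CLAIM (what is proved, stated in full; the proofs are below) =====
def Claim_equal_get_boundary_simplices : Prop := ∀ (simplex_tuple : List Int) (codim : Int), Dom_get_boundary_simplices simplex_tuple codim → Spec_get_boundary_simplices simplex_tuple codim (get_boundary_simplices simplex_tuple codim)

-- ===== LEMMAS AND PROOFS =====
lemma foldl_append_singleton (f : List Int → List Int) (xs : List (List Int)) (acc : List (List Int)) :
    xs.foldl (fun b face => b ++ [f face]) acc = acc ++ xs.map f := by
  induction xs generalizing acc with
  | nil => simp
  | cons x xs ih => simp [List.foldl, ih]

lemma pvRecB_eq (xs chosen : List Int) (target : Nat) (h : chosen.length ≤ target) :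
    pvRecB target chosen xs
      = (pvCombos xs (target - chosen.length)).map (fun c => PySem.List.sorted (chosen ++ c) (fun v => v)) := by
  induction xs generalizing chosen with
  | nil =>
    rw [pvRecB]
    by_cases hc : chosen.length = target
    · simp [hc, pvCombos]
    · have : target - chosen.length ≠ 0 := by omega
      obtain ⟨k, hk⟩ := Nat.exists_eq_succ_of_ne_zero this
      simp [hc, hk, pvCombos]
  | cons x rest ih =>
    rw [pvRecB]
    by_cases hc : chosen.length = target
    · simp [hc, pvCombos]
    · have hlt : chosen.length < target := lt_of_le_of_ne h hc
      have : target - chosen.length ≠ 0 := by omega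
      obtain ⟨k, hk⟩ := Nat.exists_eq_succ_of_ne_zero this
      have h1 : (chosen ++ [x]).length ≤ target := by simp; omega
      have h2 : target - (chosen ++ [x]).length = k := by simp; omega
      simp only [hc, if_false, ih (chosen ++ [x]) h1, ih chosen (le_of_lt hlt), h2, hk,
        pvCombos, List.map_append, List.map_map]
      congr 1
      apply List.map_congr_left
      intro c _
      simp

theorem get_boundary_simplices_spec : Claim_equal_get_boundary_simplices := by
  intro xs codim _
  unfold Spec_get_boundary_simplices get_boundary_simplices get_boundary_simplices_alt
  by_cases h : xs = [] ∨ (xs.length : Int) ≤ codim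
  · simp [h]
  · simp only [h, if_false]
    rw [foldl_append_singleton, pvRecB_eq xs [] _ (by simp)]
    simp
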